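-- pv_equiv track=rewrite | github.com/kobejean/cp-library | cp_library/math/superset_zeta_fn.py | superset_zeta
-- ===== SOURCE A (Python) =====
-- def superset_zeta(A, N: int, Z: int = None):
--     Z = 1 << N if Z is None else Z
--     for i in range(N):
--         m = b = 1<<i
--         while m < Z:
--             A[m ^ b] += A[m]
--             m = m+1|b
--     return A
-- ===== SOURCE B (Python) =====
-- def superset_zeta(A, N: int, Z: int = None):
--     # Recursive divide-and-conquer superset zeta: process aligned power-of-two
--     # blocks by recursing on both halves and then folding the high half into the
--     # low half, driven block-wise across [0, Z).  Mutates A in place like A.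
--     Z = 1 << N if Z is None else Z
--     if N <= 0:
--         return A
--     K = 0
--     while K < N and (1 << K) < Z:
--         K += 1
--
--     def zrec(off, k):
--         # zeta-transform the aligned block [off, off+2**k) with bit layers < k
--         if k == 0 or off >= Z:
--             return
--         half = 1 << (k - 1)
--         zrec(off, k - 1)
--         zrec(off + half, k - 1)
--         for j in range(min(half, Z - off - half)):
--             A[off + j] += A[off + half + j]
--
--     off = 0
--     while off < Z:
--         zrec(off, K)
--         off += 1 << K
--     return A
-- ===== Notes on version B (the rewrite author's own statement) =====
-- stated objective: alternative
-- what changed: B computes the superset zeta by recursive divide-and-conquer: aligned power-of-two blocks are transformed by recursing on the low and high half and then folding the high half into the low half with one merge loop, driven block-wise across [0, Z), instead of A's N flat bit-layer passes that walk the set-bit indices with the m=m+1|b trick.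
import Mathlib
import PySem

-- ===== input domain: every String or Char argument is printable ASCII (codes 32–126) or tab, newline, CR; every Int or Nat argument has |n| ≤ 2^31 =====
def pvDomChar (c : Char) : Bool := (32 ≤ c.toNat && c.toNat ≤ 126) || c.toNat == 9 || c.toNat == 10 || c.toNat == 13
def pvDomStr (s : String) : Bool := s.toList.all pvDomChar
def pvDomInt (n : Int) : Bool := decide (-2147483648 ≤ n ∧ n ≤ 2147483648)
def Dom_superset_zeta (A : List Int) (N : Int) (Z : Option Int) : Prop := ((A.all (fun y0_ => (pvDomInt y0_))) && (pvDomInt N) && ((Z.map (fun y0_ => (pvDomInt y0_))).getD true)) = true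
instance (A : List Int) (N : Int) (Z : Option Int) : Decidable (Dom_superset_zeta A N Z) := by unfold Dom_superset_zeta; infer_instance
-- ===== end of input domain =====

-- B computes the superset zeta by recursive divide-and-conquer over aligned power-of-two
-- blocks (recurse on both halves, then fold the high half into the low half), driven
-- block-wise across [0, Z), instead of A's N flat bit-layer passes ('alternative').
-- Both A and B mutate the argument list in place in Python; the equivalence proved here
-- is about the return value.

-- ===== PORT A =====
-- Z = 1 << N if Z is None else Z   (1 << N = 2^N; N < 0 raises in Python, excluded by Pre_)
def pvZv (N : Int) (Z : Option Int) : Int :=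
  match Z with
  | none => (2 : Int) ^ N.toNat
  | some z => z

-- while m < Z: A[m ^ b] += A[m]; m = m+1|b     (an out-of-range read raises IndexError in
-- Python and is excluded by Pre_; the port reads getD _ 0 there)
def whileA (b : Nat) (Zv : Int) (m : Nat) (X : List Int) : List Int :=
  if h : (m : Int) < Zv then
    whileA b Zv ((m + 1) ||| b) (X.set (m ^^^ b) (X.getD (m ^^^ b) 0 + X.getD m 0))
  else X
termination_by Zv.toNat - m
decreasing_by
  exact Nat.sub_lt_sub_left (Int.lt_toNat.mpr h)
    (Nat.lt_of_lt_of_le (Nat.lt_succ_self m) Nat.left_le_or)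

def superset_zeta (A : List Int) (N : Int) (Z : Option Int) : List Int :=
  let Zv := pvZv N Z
  (List.range N.toNat).foldl (fun acc i => whileA (2 ^ i) Zv (2 ^ i) acc) A

-- ===== PORT B =====
-- K = 0; while K < N and (1 << K) < Z: K += 1     (bit layers ≥ K are empty)
def calcK (Zv : Int) (N K : Nat) : Nat :=
  if h : K < N ∧ (2 : Int) ^ K < Zv then calcK Zv N (K + 1) else K
termination_by N - K
decreasing_by exact Nat.sub_succ_lt_self N K h.1

-- def zrec(off, k): the recursive divide-and-conquer block transform of Source B:
-- recurse on the two halves of the aligned block [off, off+2^k), then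
-- for j in range(min(half, Z - off - half)): A[off+j] += A[off+half+j]
def zrec (Zv : Int) : Nat → Nat → List Int → List Int
  | 0, _, X => X
  | k + 1, off, X =>
    if (off : Int) < Zv then
      let half := 2 ^ k
      let X1 := zrec Zv k off X
      let X2 := zrec Zv k (off + half) X1
      (List.range (min half (Zv - (off : Int) - (half : Int)).toNat)).foldl
        (fun Y j => Y.set (off + j) (Y.getD (off + j) 0 + Y.getD (off + half + j) 0)) X2
    else X

-- off = 0; while off < Z: zrec(off, K); off += 1 << K
def driver (Zv : Int) (K : Nat) (off : Nat) (X : List Int) : List Int :=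
  if h : (off : Int) < Zv then driver Zv K (off + 2 ^ K) (zrec Zv K off X) else X
termination_by Zv.toNat - off
decreasing_by
  exact Nat.sub_lt_sub_left (Int.lt_toNat.mpr h) (Nat.lt_add_of_pos_right (Nat.two_pow_pos K))

def superset_zeta_alt (A : List Int) (N : Int) (Z : Option Int) : List Int :=
  let Zv := pvZv N Z
  if N ≤ 0 then A
  else driver Zv (calcK Zv N.toNat 0) 0 A

-- ===== PRECONDITION & SPEC =====
-- Pre_ holds exactly where the Python A returns normally: it excludes Z=None with N<0
-- (ValueError on 1<<N) and the inputs where the per-bit walk reads an index past the end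
-- of A (IndexError).  The `N ≤ 62` conjuncts only keep the power 2^N computable; they
-- could exclude nothing but lists of length ≥ 2^62.
def Pre_superset_zeta (A : List Int) (N : Int) (Z : Option Int) : Prop :=
  (Z = none → 0 ≤ N ∧ (0 < N → N ≤ 62 ∧ ((2 : Int) ^ N.toNat ≤ (A.length : Int)))) ∧
  (0 < N → 1 < Z.getD 1 →
    (Z.getD 1 ≤ (A.length : Int) ∨
      (Z.getD 1 = (A.length : Int) + 1 ∧ N ≤ 62 ∧ (A.length : Int) % (2 : Int) ^ N.toNat = 0)))
instance (A : List Int) (N : Int) (Z : Option Int) : Decidable (Pre_superset_zeta A N Z) := by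
  unfold Pre_superset_zeta; infer_instance

def pvWitness_superset_zeta : List Int × Int × Option Int := ([1, 2, 3, 4], 2, some 4)

def Spec_superset_zeta (A : List Int) (N : Int) (Z : Option Int) (out : List Int) : Prop := out = superset_zeta_alt A N Z
instance (A : List Int) (N : Int) (Z : Option Int) (out : List Int) : Decidable (Spec_superset_zeta A N Z out) := by unfold Spec_superset_zeta; infer_instance

-- ===== CLAIM (what is proved, stated in full; the proofs are below) =====
def Claim_equal_superset_zeta : Prop := ∀ (A : List Int) (N : Int) (Z : Option Int), Dom_superset_zeta A N Z → Pre_superset_zeta A N Z → Spec_superset_zeta A N Z (superset_zeta A N Z)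

-- ===== LEMMAS AND PROOFS =====

-- ---- bit lemmas about a power-of-two mask ----

lemma pv_and_pow_zero_iff (j i : Nat) : j &&& 2 ^ i = 0 ↔ j.testBit i = false := by
  rw [Nat.and_two_pow]
  cases h : j.testBit i <;> simp [Nat.pos_iff_ne_zero.mp (Nat.two_pow_pos i)]

lemma pv_lor_testBit (j i : Nat) : (j ||| 2 ^ i).testBit i = true := by
  simp [Nat.testBit_lor]

lemma pv_xor_clear (m i : Nat) (h : m.testBit i = true) : (m ^^^ 2 ^ i).testBit i = false := by
  simp [Nat.testBit_xor, h]

lemma pv_xor_lor (m i : Nat) (h : m.testBit i = true) : (m ^^^ 2 ^ i) ||| 2 ^ i = m := by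
  apply Nat.eq_of_testBit_eq
  intro j
  by_cases hj : i = j
  · subst hj; simp [Nat.testBit_lor, Nat.testBit_xor, h]
  · simp [Nat.testBit_lor, Nat.testBit_xor, Nat.testBit_two_pow_of_ne (fun hh => hj hh)]

lemma pv_lor_inj (a c i : Nat) (ha : a.testBit i = false) (hc : c.testBit i = false)
    (h : a ||| 2 ^ i = c ||| 2 ^ i) : a = c := by
  apply Nat.eq_of_testBit_eq
  intro j
  by_cases hj : i = j
  · subst hj; rw [ha, hc]
  · have := congrArg (fun x => Nat.testBit x j) h
    simpa [Nat.testBit_lor, Nat.testBit_two_pow_of_ne (fun hh => hj hh)] using this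

lemma pv_set_lor (m i : Nat) (h : m.testBit i = true) : m ||| 2 ^ i = m := by
  apply Nat.eq_of_testBit_eq
  intro j
  by_cases hj : i = j
  · subst hj; simp [Nat.testBit_lor, h]
  · simp [Nat.testBit_lor, Nat.testBit_two_pow_of_ne (fun hh => hj hh)]

lemma pv_clear_lor (m i : Nat) (h : m.testBit i = false) : m ||| 2 ^ i = m + 2 ^ i := by
  have hmod : m % 2 ^ i < 2 ^ i := Nat.mod_lt _ (Nat.two_pow_pos i)
  have heven : m / 2 ^ i % 2 = 0 := by
    have := Nat.testBit_eq_decide_div_mod_eq (i := i) (x := m)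
    rw [h] at this
    have h2 := (of_decide_eq_false this.symm)
    omega
  set d := m / 2 ^ i with hdd
  set r := m % 2 ^ i with hrr
  have hd : m = 2 ^ i * d + r := (Nat.div_add_mod m (2 ^ i)).symm
  have hd1 : m + 2 ^ i = 2 ^ i * (d + 1) + r := by
    have : 2 ^ i * (d + 1) + r = (2 ^ i * d + r) + 2 ^ i := by ring
    rw [this, ← hd]
  apply Nat.eq_of_testBit_eq
  intro j
  rw [Nat.testBit_lor, hd1, Nat.testBit_two_pow_mul_add _ hmod]
  conv_lhs => rw [hd, Nat.testBit_two_pow_mul_add _ hmod]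
  rcases lt_trichotomy j i with hj | hj | hj
  · simp [hj, Nat.testBit_two_pow_of_ne (Nat.ne_of_gt hj)]
  · subst hj
    simp only [lt_irrefl, if_neg (lt_irrefl j), Nat.sub_self]
    have h0 : (d + 1).testBit 0 = true := by
      simp [Nat.testBit_zero]; omega
    simp [h0]
  · have hne : ¬ j < i := by omega
    simp only [if_neg hne]
    have hx : (d + 1) = d ^^^ 1 := by
      rw [Nat.xor_one_of_even (Nat.even_iff.mpr heven)]
    rw [hx, Nat.testBit_xor]
    have h1 : Nat.testBit 1 (j - i) = false := by
      have hne0 : (0 : Nat) ≠ j - i := by omega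
      simpa using Nat.testBit_two_pow_of_ne hne0 (n := 0)
    rw [h1]
    simp [Nat.testBit_two_pow_of_ne (Nat.ne_of_lt hj)]

lemma pv_decomp (m i : Nat) (hm : m.testBit i = true) :
    ∃ q r, r < 2 ^ i ∧ m = 2 ^ (i + 1) * q + 2 ^ i + r := by
  have hmod : m % 2 ^ i < 2 ^ i := Nat.mod_lt _ (Nat.two_pow_pos i)
  have hodd : m / 2 ^ i % 2 = 1 := by
    have := Nat.testBit_eq_decide_div_mod_eq (i := i) (x := m)
    rw [hm] at this
    exact of_decide_eq_true this.symm
  refine ⟨m / 2 ^ i / 2, m % 2 ^ i, hmod, ?_⟩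
  have hd : m = 2 ^ i * (m / 2 ^ i) + m % 2 ^ i := (Nat.div_add_mod m (2 ^ i)).symm
  have hq : m / 2 ^ i = 2 * (m / 2 ^ i / 2) + 1 := by omega
  calc m = 2 ^ i * (m / 2 ^ i) + m % 2 ^ i := hd
    _ = 2 ^ i * (2 * (m / 2 ^ i / 2) + 1) + m % 2 ^ i := by rw [← hq]
    _ = 2 ^ (i + 1) * (m / 2 ^ i / 2) + 2 ^ i + m % 2 ^ i := by ring

-- after A[m^b] += A[m] the loop moves to m+1|b, the NEXT index ≥ m+1 with bit i set
lemma pv_next_le (m k i : Nat) (hm : m.testBit i = true) (hk : k.testBit i = true)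
    (hlt : m < k) : (m + 1) ||| 2 ^ i ≤ k := by
  obtain ⟨q, r, hr, hmeq⟩ := pv_decomp m i hm
  obtain ⟨p, s, hs, hkeq⟩ := pv_decomp k i hk
  by_cases hcase : r + 1 < 2 ^ i
  · have hb : (m + 1).testBit i = true := by
      have : m + 1 = 2 ^ i * (2 * q + 1) + (r + 1) := by rw [hmeq]; ring
      rw [this, Nat.testBit_two_pow_mul_add _ hcase]
      simp [Nat.testBit_zero]
    rw [pv_set_lor _ _ hb]; omega
  · have hr1 : r + 1 = 2 ^ i := by omega
    have hb : (m + 1).testBit i = false := by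
      have he : m + 1 = 2 ^ i * (2 * (q + 1)) + 0 := by
        have : 2 ^ i * (2 * (q + 1)) = 2 ^ (i + 1) * q + 2 ^ i + 2 ^ i := by ring
        omega
      rw [he, Nat.testBit_two_pow_mul_add _ (Nat.two_pow_pos i)]
      simp [Nat.testBit_zero]
    rw [pv_clear_lor _ _ hb]
    rcases Nat.lt_or_ge p (q + 1) with hp | hp
    · exfalso
      have h1 : 2 ^ (i + 1) * p ≤ 2 ^ (i + 1) * q := Nat.mul_le_mul_left _ (by omega)
      omega
    · have h1 : 2 ^ (i + 1) * (q + 1) ≤ 2 ^ (i + 1) * p := Nat.mul_le_mul_left _ hp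
      have h2 : 2 ^ (i + 1) * (q + 1) = 2 ^ (i + 1) * q + 2 ^ (i + 1) := by ring
      have h3 : 2 ^ (i + 1) = 2 ^ i + 2 ^ i := by rw [pow_succ]; omega
      omega

-- bits of an index inside an aligned block
lemma pv_testBit_low (q k j : Nat) (hj : j < 2 ^ k) :
    (2 ^ (k + 1) * q + j).testBit k = false := by
  have hj2 : j < 2 ^ (k + 1) := lt_of_lt_of_le hj (Nat.pow_le_pow_right (by norm_num) (by omega))
  rw [Nat.testBit_two_pow_mul_add _ hj2, if_pos (Nat.lt_succ_self k)]
  exact Nat.testBit_lt_two_pow hj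

lemma pv_testBit_high (q k j : Nat) (hj : j < 2 ^ k) :
    (2 ^ (k + 1) * q + (2 ^ k + j)).testBit k = true := by
  have hj2 : 2 ^ k + j < 2 ^ (k + 1) := by
    have : 2 ^ (k + 1) = 2 ^ k + 2 ^ k := by rw [pow_succ]; omega
    omega
  rw [Nat.testBit_two_pow_mul_add _ hj2, if_pos (Nat.lt_succ_self k)]
  have : 2 ^ k + j = 2 ^ k * 1 + j := by ring
  rw [this, Nat.testBit_two_pow_mul_add _ hj, if_neg (lt_irrefl k), Nat.sub_self]
  simp [Nat.testBit_zero]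

-- ---- list access helpers ----

lemma pv_getD_map_range (f : Nat → Int) (L j : Nat) (h : j < L) :
    (((List.range L).map f).getD j 0) = f j := by
  rw [List.getD_eq_getElem?_getD]
  simp [List.getElem?_map, List.getElem?_range h]

lemma pv_map_range_getD_self (X : List Int) :
    (List.range X.length).map (fun j => X.getD j 0) = X := by
  apply List.ext_getElem
  · simp
  · intro j h1 h2
    simp [List.getD_eq_getElem?_getD, List.getElem?_eq_getElem, h2]

-- ---- the canonical pure layer, the truncated layer of A's loop, and their relations ----

def zl (b : Nat) (Zv : Int) (X : List Int) : List Int :=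
  (List.range X.length).map (fun j =>
    if j &&& b = 0 ∧ ((((j ||| b) : Nat) : Int) < Zv) then
      X.getD j 0 + X.getD (j ||| b) 0
    else X.getD j 0)

def zlm (b : Nat) (Zv : Int) (m : Nat) (X : List Int) : List Int :=
  (List.range X.length).map (fun j =>
    if j &&& b = 0 ∧ m ≤ j ||| b ∧ ((((j ||| b) : Nat) : Int) < Zv) then
      X.getD j 0 + X.getD (j ||| b) 0
    else X.getD j 0)

lemma pv_length_zl (b : Nat) (Zv : Int) (X : List Int) : (zl b Zv X).length = X.length := by
  simp [zl]

lemma pv_getD_zl (b : Nat) (Zv : Int) (X : List Int) (j : Nat) :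
    (zl b Zv X).getD j 0 =
      if j &&& b = 0 ∧ ((((j ||| b) : Nat) : Int) < Zv) then
        X.getD j 0 + X.getD (j ||| b) 0
      else X.getD j 0 := by
  by_cases hj : j < X.length
  · rw [zl, pv_getD_map_range _ _ _ hj]
  · have h1 : (zl b Zv X).getD j 0 = 0 :=
      List.getD_eq_default _ _ (by rw [pv_length_zl]; omega)
    have h2 : X.getD j 0 = 0 := List.getD_eq_default _ _ (by omega)
    have h3 : X.getD (j ||| b) 0 = 0 :=
      List.getD_eq_default _ _ (le_trans (by omega) Nat.left_le_or)
    rw [h1, h2, h3]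
    split <;> simp

lemma pv_zlm_start_eq_zl (b : Nat) (Zv : Int) (X : List Int) :
    zlm b Zv b X = zl b Zv X := by
  unfold zlm zl
  apply List.map_congr_left
  intro j hj
  have hle : b ≤ j ||| b := Nat.right_le_or
  by_cases h1 : j &&& b = 0 ∧ ((((j ||| b) : Nat) : Int) < Zv)
  · rw [if_pos ⟨h1.1, hle, h1.2⟩, if_pos h1]
  · rw [if_neg (by tauto), if_neg h1]

lemma pv_zlm_stop (b : Nat) (Zv : Int) (m : Nat) (X : List Int) (h : ¬ ((m : Int) < Zv)) :
    zlm b Zv m X = X := by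
  unfold zlm
  have hcong : ∀ j ∈ List.range X.length,
      (if j &&& b = 0 ∧ m ≤ j ||| b ∧ ((((j ||| b) : Nat) : Int) < Zv) then
        X.getD j 0 + X.getD (j ||| b) 0 else X.getD j 0) = X.getD j 0 := by
    intro j _
    rw [if_neg]
    rintro ⟨_, h1, h2⟩
    have : (m : Int) ≤ ((j ||| b : Nat) : Int) := by exact_mod_cast h1
    omega
  rw [List.map_congr_left hcong, pv_map_range_getD_self]

-- the loop invariant: from position m, the while loop adds A[s] into A[s^b] for every
-- still-unprocessed source index s ≥ m with bit i set and s < Z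
lemma pv_whileA_eq_zlm (i : Nat) (Zv : Int) :
    ∀ (fuel m : Nat) (X : List Int), Zv.toNat - m ≤ fuel → m.testBit i = true →
      whileA (2 ^ i) Zv m X = zlm (2 ^ i) Zv m X := by
  intro fuel
  induction fuel with
  | zero =>
    intro m X hf hm
    have hstop : ¬ ((m : Int) < Zv) := by omega
    rw [whileA, dif_neg hstop, pv_zlm_stop _ _ _ _ hstop]
  | succ fuel ih =>
    intro m X hf hm
    by_cases hlt : (m : Int) < Zv
    · rw [whileA, dif_pos hlt]
      set b := 2 ^ i with hb
      set t := m ^^^ b with ht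
      set m' := (m + 1) ||| b with hm'
      set X' := X.set t (X.getD t 0 + X.getD m 0) with hX'
      have hm'bit : m'.testBit i = true := pv_lor_testBit _ _
      have hm'gt : m < m' := lt_of_lt_of_le (Nat.lt_succ_self m) Nat.left_le_or
      have hrec : whileA b Zv m' X' = zlm b Zv m' X' := by
        apply ih
        · have : m < Zv.toNat := by omega
          omega
        · exact hm'bit
      rw [hrec]
      have htbit : t.testBit i = false := pv_xor_clear _ _ hm
      have htlor : t ||| b = m := pv_xor_lor _ _ hm
      have hlen : X'.length = X.length := by rw [hX', List.length_set]
      unfold zlm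
      rw [hlen]
      apply List.map_congr_left
      intro j hj
      have hjl : j < X.length := List.mem_range.mp hj
      by_cases hjb : j &&& b = 0
      · have hjbit : j.testBit i = false := (pv_and_pow_zero_iff j i).mp hjb
        by_cases hjt : j = t
        · subst hjt
          rw [htlor]
          rw [if_neg (by rintro ⟨_, h1, _⟩; omega), if_pos ⟨hjb, le_refl m, by exact_mod_cast hlt⟩]
          rw [hX', List.getD_eq_getElem?_getD, List.getElem?_set_self (by omega)]
          rfl
        · have hne1 : j ≠ t := hjt
          have hlorne : j ||| b ≠ m := by
            intro he
            exact hjt (pv_lor_inj j t i hjbit htbit (by rw [htlor, he]))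
          have hlorbit : (j ||| b).testBit i = true := pv_lor_testBit _ _
          have hlornet : j ||| b ≠ t := by
            intro he; rw [he, htbit] at hlorbit; exact Bool.false_ne_true hlorbit
          have hg1 : X'.getD j 0 = X.getD j 0 := by
            rw [hX', List.getD_eq_getElem?_getD, List.getElem?_set_ne (fun hh => hne1 hh.symm),
              ← List.getD_eq_getElem?_getD]
          have hg2 : X'.getD (j ||| b) 0 = X.getD (j ||| b) 0 := by
            rw [hX', List.getD_eq_getElem?_getD, List.getElem?_set_ne (fun hh => hlornet hh.symm),
              ← List.getD_eq_getElem?_getD]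
          have hiff : (m' ≤ j ||| b) ↔ (m ≤ j ||| b) := by
            constructor
            · intro h; omega
            · intro h
              have : m < j ||| b := lt_of_le_of_ne h (Ne.symm hlorne)
              exact pv_next_le m (j ||| b) i hm hlorbit this
          rw [hg1, hg2]
          by_cases hc : m ≤ j ||| b ∧ ((((j ||| b) : Nat) : Int) < Zv)
          · rw [if_pos ⟨hjb, hiff.mpr hc.1, hc.2⟩, if_pos ⟨hjb, hc.1, hc.2⟩]
          · rw [if_neg (by tauto), if_neg (by tauto)]
      · rw [if_neg (by tauto), if_neg (by tauto)]
        have hne : j ≠ t := by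
          intro he
          apply hjb
          rw [he]
          exact (pv_and_pow_zero_iff t i).mpr htbit
        rw [hX', List.getD_eq_getElem?_getD, List.getElem?_set_ne (fun hh => hne hh.symm),
          ← List.getD_eq_getElem?_getD]
    · rw [whileA, dif_neg hlt, pv_zlm_stop _ _ _ _ hlt]

-- ---- tying port A to the canonical layered fold ----

lemma pv_foldl_congr (f g : List Int → Nat → List Int) (h : ∀ Y x, f Y x = g Y x) :
    ∀ (l : List Nat) (Y : List Int), l.foldl f Y = l.foldl g Y := by
  intro l
  induction l with
  | nil => intro Y; rfl
  | cons a l ih => intro Y; simp only [List.foldl_cons]; rw [h, ih]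

lemma pv_portA_eq (A : List Int) (N : Int) (Z : Option Int) :
    superset_zeta A N Z = (List.range N.toNat).foldl (fun Y i => zl (2 ^ i) (pvZv N Z) Y) A := by
  unfold superset_zeta
  apply pv_foldl_congr
  intro Y i
  rw [pv_whileA_eq_zlm i (pvZv N Z) (pvZv N Z).toNat (2 ^ i) Y (Nat.sub_le _ _)
    Nat.testBit_two_pow_self, pv_zlm_start_eq_zl]

lemma pv_fold_len (Zv : Int) :
    ∀ (l : List Nat) (Y : List Int), (l.foldl (fun Y i => zl (2 ^ i) Zv Y) Y).length = Y.length := by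
  intro l
  induction l with
  | nil => intro Y; rfl
  | cons a l ih => intro Y; simp only [List.foldl_cons]; rw [ih, pv_length_zl]

-- ---- G: the pointwise superset-sum both algorithms compute ----
-- G Zv X k t = the value at index t after the (truncated) bit layers 0..k-1 have run on X

def G (Zv : Int) (X : List Int) : Nat → Nat → Int
  | 0, t => X.getD t 0
  | k + 1, t =>
    G Zv X k t +
      (if t.testBit k = false ∧ ((((t ||| 2 ^ k) : Nat) : Int) < Zv) then
        G Zv X k (t ||| 2 ^ k)
      else 0)

lemma pv_G_succ (Zv : Int) (X : List Int) (k t : Nat) :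
    G Zv X (k + 1) t =
      G Zv X k t +
        (if t.testBit k = false ∧ ((((t ||| 2 ^ k) : Nat) : Int) < Zv) then
          G Zv X k (t ||| 2 ^ k)
        else 0) := rfl

lemma pv_G_congr (Zv : Int) (X Y : List Int) :
    ∀ (k t : Nat), (∀ s, t ≤ s → X.getD s 0 = Y.getD s 0) → G Zv X k t = G Zv Y k t := by
  intro k
  induction k with
  | zero => intro t h; exact h t (le_refl t)
  | succ k ih =>
    intro t h
    rw [pv_G_succ, ih t h, ih (t ||| 2 ^ k) (fun s hs => h s (le_trans Nat.left_le_or hs)),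
      ← pv_G_succ]

lemma pv_G_ge (Zv : Int) (X : List Int) :
    ∀ (k t : Nat), Zv ≤ (t : Int) → G Zv X k t = X.getD t 0 := by
  intro k
  induction k with
  | zero => intro t _; rfl
  | succ k ih =>
    intro t h
    rw [pv_G_succ, ih t h, if_neg, add_zero]
    rintro ⟨_, h2⟩
    have h3 : t ≤ t ||| 2 ^ k := Nat.left_le_or
    have h4 : ((t : Nat) : Int) ≤ (((t ||| 2 ^ k : Nat)) : Int) := Int.ofNat_le.mpr h3
    omega

lemma pv_foldzl_getD (Zv : Int) (X : List Int) :
    ∀ (n t : Nat),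
      ((List.range n).foldl (fun Y i => zl (2 ^ i) Zv Y) X).getD t 0 = G Zv X n t := by
  intro n
  induction n with
  | zero => intro t; rfl
  | succ n ih =>
    intro t
    rw [List.range_succ, List.foldl_append]
    simp only [List.foldl_cons, List.foldl_nil]
    rw [pv_getD_zl, pv_G_succ]
    have hiff : (t &&& 2 ^ n = 0 ∧ ((((t ||| 2 ^ n) : Nat) : Int) < Zv)) ↔
        (t.testBit n = false ∧ ((((t ||| 2 ^ n) : Nat) : Int) < Zv)) := by
      rw [pv_and_pow_zero_iff]
    by_cases hc : t.testBit n = false ∧ ((((t ||| 2 ^ n) : Nat) : Int) < Zv)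
    · rw [if_pos (hiff.mpr hc), if_pos hc, ih, ih]
    · rw [if_neg (fun hh => hc (hiff.mp hh)), if_neg hc, ih, add_zero]

lemma pv_G_top (Zv : Int) (X : List Int) (K : Nat) (hstop : ¬ ((2 : Int) ^ K < Zv)) :
    ∀ (n : Nat), K ≤ n → ∀ t, G Zv X n t = G Zv X K t := by
  intro n
  induction n with
  | zero =>
    intro h t
    have h0 : K = 0 := by omega
    subst h0; rfl
  | succ n ih =>
    intro h t
    by_cases hKn : K = n + 1
    · subst hKn; rfl
    · have hK : K ≤ n := by omega
      rw [pv_G_succ, if_neg, add_zero, ih hK]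
      rintro ⟨_, h2⟩
      have h3 : (2 : Nat) ^ K ≤ 2 ^ n := Nat.pow_le_pow_right (by norm_num) hK
      have h4 : (2 : Nat) ^ n ≤ t ||| 2 ^ n := Nat.right_le_or
      have h5 : ((2 ^ K : Nat) : Int) ≤ (((t ||| 2 ^ n : Nat)) : Int) :=
        Int.ofNat_le.mpr (le_trans h3 h4)
      have h6 : ((2 ^ K : Nat) : Int) = (2 : Int) ^ K := by push_cast; ring
      omega

-- ---- calcK ----

lemma pv_calcK_le (Zv : Int) (N K : Nat) : K ≤ N → calcK Zv N K ≤ N := by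
  induction K using calcK.induct (Zv := Zv) (N := N) with
  | case1 K hc ih => intro _; rw [calcK, dif_pos hc]; exact ih (by omega)
  | case2 K hc => intro h; rw [calcK, dif_neg hc]; exact h

lemma pv_calcK_stop (Zv : Int) (N K : Nat) :
    calcK Zv N K < N → ¬ ((2 : Int) ^ (calcK Zv N K) < Zv) := by
  induction K using calcK.induct (Zv := Zv) (N := N) with
  | case1 K hc ih => rw [calcK, dif_pos hc]; exact ih
  | case2 K hc => rw [calcK, dif_neg hc]; intro hKN hlt; exact hc ⟨hKN, hlt⟩

-- ---- the merge loop of zrec ----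

lemma pv_merge_len (off half : Nat) :
    ∀ (l : List Nat) (X : List Int),
      (l.foldl (fun Y j => Y.set (off + j) (Y.getD (off + j) 0 + Y.getD (off + half + j) 0)) X).length
        = X.length := by
  intro l
  induction l with
  | nil => intro X; rfl
  | cons a l ih => intro X; simp only [List.foldl_cons]; rw [ih, List.length_set]

lemma pv_merge_getD (off half : Nat) (X : List Int) :
    ∀ (J : Nat), ∀ t,
      ((List.range J).foldl
          (fun Y j => Y.set (off + j) (Y.getD (off + j) 0 + Y.getD (off + half + j) 0)) X).getD t 0
        = if off ≤ t ∧ t < off + J then X.getD t 0 + X.getD (t + half) 0 else X.getD t 0 := by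
  intro J
  induction J with
  | zero => intro t; simp
  | succ J ih =>
    intro t
    rw [List.range_succ, List.foldl_append]
    simp only [List.foldl_cons, List.foldl_nil]
    set F := (List.range J).foldl
      (fun Y j => Y.set (off + j) (Y.getD (off + j) 0 + Y.getD (off + half + j) 0)) X with hF
    have hlen : F.length = X.length := pv_merge_len off half _ X
    have hv1 : F.getD (off + J) 0 = X.getD (off + J) 0 := by rw [ih, if_neg (by omega)]
    have hv2 : F.getD (off + half + J) 0 = X.getD (off + half + J) 0 := by
      rw [ih, if_neg (by omega)]
    by_cases ht : t = off + J
    · subst ht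
      rw [if_pos (by omega)]
      by_cases hr : off + J < F.length
      · rw [List.getD_eq_getElem?_getD, List.getElem?_set_self (by omega), Option.getD_some,
          hv1, hv2]
        have : off + J + half = off + half + J := by omega
        rw [this]
      · have hset : (F.set (off + J) (F.getD (off + J) 0 + F.getD (off + half + J) 0)).getD (off + J) 0 = 0 := by
          apply List.getD_eq_default
          rw [List.length_set]; omega
        rw [hset]
        have h1 : X.getD (off + J) 0 = 0 := List.getD_eq_default _ _ (by omega)
        have h2 : X.getD (off + J + half) 0 = 0 := List.getD_eq_default _ _ (by omega)
        rw [h1, h2, add_zero]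
    · rw [List.getD_eq_getElem?_getD, List.getElem?_set_ne (fun hh => ht hh.symm),
        ← List.getD_eq_getElem?_getD, ih]
      by_cases hc : off ≤ t ∧ t < off + J
      · rw [if_pos hc, if_pos (by omega)]
      · rw [if_neg hc, if_neg (by omega)]

-- ---- the divide-and-conquer recursion computes G on its aligned block ----

lemma pv_zrec_len (Zv : Int) :
    ∀ (k off : Nat) (X : List Int), (zrec Zv k off X).length = X.length := by
  intro k
  induction k with
  | zero => intro off X; rfl
  | succ k ih =>
    intro off X
    rw [zrec]
    by_cases h : (off : Int) < Zv
    · rw [if_pos h]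
      simp only []
      rw [pv_merge_len, ih, ih]
    · rw [if_neg h]

lemma pv_zrec_getD (Zv : Int) :
    ∀ (k off : Nat) (X : List Int), 2 ^ k ∣ off → ∀ t,
      (zrec Zv k off X).getD t 0 =
        if off ≤ t ∧ t < off + 2 ^ k then G Zv X k t else X.getD t 0 := by
  intro k
  induction k with
  | zero =>
    intro off X _ t
    show X.getD t 0 = _
    by_cases h : off ≤ t ∧ t < off + 2 ^ 0
    · have ht : t = off := by simp at h; omega
      subst ht
      rw [if_pos h]; rfl
    · rw [if_neg h]
  | succ k ih =>
    intro off X hdiv t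
    obtain ⟨q, hq⟩ := hdiv
    rw [zrec]
    by_cases hoff : (off : Int) < Zv
    · rw [if_pos hoff]
      simp only []
      set half := 2 ^ k with hhalf
      have hd1 : 2 ^ k ∣ off := ⟨2 * q, by rw [hq]; ring⟩
      have hd2 : 2 ^ k ∣ off + half := ⟨2 * q + 1, by rw [hq, hhalf]; ring⟩
      set X1 := zrec Zv k off X with hX1
      set X2 := zrec Zv k (off + half) X1 with hX2
      -- X2 pointwise
      have hX2v : ∀ s, X2.getD s 0 =
          if off ≤ s ∧ s < off + 2 ^ (k + 1) then G Zv X k s else X.getD s 0 := by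
        intro s
        rw [hX2, ih (off + half) X1 hd2]
        have h2 : (2 : Nat) ^ (k + 1) = half + half := by rw [hhalf, pow_succ]; ring
        by_cases hs : off + half ≤ s ∧ s < off + half + 2 ^ k
        · rw [if_pos hs, if_pos (by omega)]
          apply pv_G_congr
          intro u hu
          rw [hX1, ih off X hd1, if_neg (by omega)]
        · rw [if_neg hs, hX1, ih off X hd1]
          by_cases hlow : off ≤ s ∧ s < off + half
          · rw [if_pos (by omega), if_pos (by omega)]
          · rw [if_neg (by omega), if_neg (by omega)]
      set J := min half (Zv - (off : Int) - (half : Int)).toNat with hJ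
      have hJle : J ≤ half := min_le_left _ _
      rw [pv_merge_getD]
      have h2 : (2 : Nat) ^ (k + 1) = half + half := by rw [hhalf, pow_succ]; ring
      by_cases hin : off ≤ t ∧ t < off + 2 ^ (k + 1)
      · rw [if_pos hin]
        unfold G
        by_cases hlow : t < off + half
        · -- low half: target of a (possible) merge add
          have hbitf : t.testBit k = false := by
            have ht : t = 2 ^ (k + 1) * q + (t - off) := by omega
            rw [ht]
            exact pv_testBit_low q k (t - off) (by omega)
          have hlor : t ||| 2 ^ k = t + half := by
            rw [pv_clear_lor t k hbitf, hhalf]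
          by_cases hadd : t < off + J
          · rw [if_pos (by omega), hX2v t, if_pos (by omega), hX2v (t + half),
              if_pos (by omega), if_pos]
            · rw [hlor]
            · refine ⟨hbitf, ?_⟩
              rw [hlor]
              have : t - off < (Zv - (off : Int) - (half : Int)).toNat := by omega
              push_cast
              omega
          · rw [if_neg (by omega), hX2v t, if_pos (by omega), if_neg, add_zero]
            rintro ⟨_, hzz⟩
            rw [hlor] at hzz
            have hJm : J < half := by omega
            have : ¬ ((t : Int) + (half : Int) < Zv) := by
              have hJM : J = (Zv - (off : Int) - (half : Int)).toNat := by omega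
              omega
            push_cast at hzz
            omega
        · -- high half: untouched by the merge, bit k set
          have hbitt : t.testBit k = true := by
            have ht : t = 2 ^ (k + 1) * q + (2 ^ k + (t - off - half)) := by
              rw [hhalf] at *; omega
            rw [ht]
            exact pv_testBit_high q k (t - off - half) (by rw [hhalf] at *; omega)
          rw [if_neg (by omega), hX2v t, if_pos (by omega), if_neg, add_zero]
          rintro ⟨hbf, _⟩
          rw [hbitt] at hbf
          simp at hbf
      · rw [if_neg hin, if_neg (by omega), hX2v t, if_neg hin]
    · rw [if_neg hoff]
      by_cases hin : off ≤ t ∧ t < off + 2 ^ (k + 1)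
      · rw [if_pos hin]
        have : Zv ≤ (t : Int) := by
          have : (off : Int) ≤ (t : Int) := Int.ofNat_le.mpr hin.1
          omega
        rw [pv_G_ge Zv X (k + 1) t this]
      · rw [if_neg hin]

-- ---- the block driver ----

lemma pv_driver_len (Zv : Int) (K : Nat) :
    ∀ (fuel off : Nat) (X : List Int), Zv.toNat - off ≤ fuel →
      (driver Zv K off X).length = X.length := by
  intro fuel
  induction fuel with
  | zero =>
    intro off X hf
    have hstop : ¬ ((off : Int) < Zv) := by omega
    rw [driver, dif_neg hstop]
  | succ fuel ih =>
    intro off X hf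
    by_cases h : (off : Int) < Zv
    · rw [driver, dif_pos h, ih _ _ (by have h1 : 1 ≤ 2 ^ K := Nat.one_le_two_pow; omega),
        pv_zrec_len]
    · rw [driver, dif_neg h]

lemma pv_driver_getD (Zv : Int) (K : Nat) (A0 : List Int) :
    ∀ (fuel off : Nat) (X : List Int), Zv.toNat - off ≤ fuel → 2 ^ K ∣ off →
      (∀ t, t < off → X.getD t 0 = G Zv A0 K t) →
      (∀ t, off ≤ t → X.getD t 0 = A0.getD t 0) →
      ∀ t, (driver Zv K off X).getD t 0 = G Zv A0 K t := by
  intro fuel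
  induction fuel with
  | zero =>
    intro off X hf hdiv hlo hhi t
    have hstop : ¬ ((off : Int) < Zv) := by omega
    rw [driver, dif_neg hstop]
    by_cases ht : t < off
    · exact hlo t ht
    · rw [hhi t (by omega)]
      have : Zv ≤ (t : Int) := by omega
      rw [pv_G_ge Zv A0 K t this]
  | succ fuel ih =>
    intro off X hf hdiv hlo hhi t
    by_cases h : (off : Int) < Zv
    · rw [driver, dif_pos h]
      have h1 : 1 ≤ 2 ^ K := Nat.one_le_two_pow
      apply ih
      · omega
      · exact Dvd.dvd.add hdiv dvd_rfl
      · intro s hs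
        rw [pv_zrec_getD Zv K off X hdiv]
        by_cases hblock : off ≤ s ∧ s < off + 2 ^ K
        · rw [if_pos hblock]
          apply pv_G_congr
          intro u hu
          exact hhi u (by omega)
        · rw [if_neg hblock]
          exact hlo s (by omega)
      · intro s hs
        rw [pv_zrec_getD Zv K off X hdiv, if_neg (by omega)]
        exact hhi s (by omega)
    · rw [driver, dif_neg h]
      by_cases ht : t < off
      · exact hlo t ht
      · rw [hhi t (by omega)]
        have : Zv ≤ (t : Int) := by omega
        rw [pv_G_ge Zv A0 K t this]

-- ---- the equivalence ----

lemma pv_main (A : List Int) (N : Int) (Z : Option Int) :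
    superset_zeta A N Z = superset_zeta_alt A N Z := by
  by_cases hN : N ≤ 0
  · have h0 : N.toNat = 0 := by omega
    unfold superset_zeta superset_zeta_alt
    rw [h0, if_pos hN]
    rfl
  · unfold superset_zeta_alt
    rw [if_neg hN]
    set Zv := pvZv N Z with hZv
    set K := calcK Zv N.toNat 0 with hK
    have hKle : K ≤ N.toNat := pv_calcK_le Zv N.toNat 0 (Nat.zero_le _)
    have hA := pv_portA_eq A N Z
    apply List.ext_getElem
    · rw [hA, pv_fold_len, pv_driver_len Zv K Zv.toNat 0 A (by omega)]
    · intro i h1 h2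
      rw [← List.getD_eq_getElem _ 0, ← List.getD_eq_getElem _ 0, hA, pv_foldzl_getD,
        pv_driver_getD Zv K A Zv.toNat 0 A (by omega) (dvd_zero _)
          (fun t ht => absurd ht (by omega)) (fun t _ => rfl)]
      by_cases hKN : K < N.toNat
      · exact pv_G_top Zv A K (pv_calcK_stop Zv N.toNat 0 hKN) N.toNat hKle i
      · have : K = N.toNat := by omega
        rw [this]

-- ===== VERDICT =====
theorem superset_zeta_spec : Claim_equal_superset_zeta := by
  intro A N Z _ _
  unfold Spec_superset_zeta
  exact pv_main A N Z
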